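-- pv_equiv track=rewrite | github.com/isomjd-code/courthand | extract_ngram_slices.py | normalize_ngram_for_search
-- ===== SOURCE A (Python) =====
-- def normalize_ngram_for_search(ngram: str) -> str:
--     """
--     Normalize n-gram to match the format used in cleaned text.
--
--     Rules:
--     - Regular spaces " " are removed (they don't count)
--     - "<space>" tokens are converted to space characters ' ' for matching
--     - All other characters are kept as-is
--
--     Args:
--         ngram: N-gram string (may contain spaces or be continuous)
--
--     Returns:
--         Normalized n-gram string for searching in cleaned text
--     """
--     # Convert <space> tokens to actual space characters for matching
--     # Remove regular spaces (they don't count in length)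
--     result = []
--     i = 0
--     while i < len(ngram):
--         if ngram[i] == '<':
--             # Check if it's a <space> token
--             if ngram[i:i+7] == '<space>':
--                 result.append(' ')  # Convert <space> to space character
--                 i += 7
--             else:
--                 # Other angle bracket token, find closing '>'
--                 end = ngram.find('>', i)
--                 if end != -1:
--                     result.append(ngram[i:end+1])  # Keep the token as-is
--                     i = end + 1
--                 else:
--                     result.append(ngram[i])
--                     i += 1
--         elif ngram[i] == ' ':
--             # Regular space - skip it (doesn't count)
--             i += 1
--         else:
--             # Regular character
--             result.append(ngram[i])
--             i += 1
--
--     return ''.join(result)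
-- ===== SOURCE B (Python) =====
-- def normalize_ngram_for_search(ngram: str) -> str:
--     """Tokenize into angle-bracket tokens / single chars, then classify each token."""
--     def tokens(s):
--         while s:
--             if s[0] == '<' and '>' in s:
--                 j = s.index('>')
--                 yield s[:j + 1]
--                 s = s[j + 1:]
--             else:
--                 yield s[0]
--                 s = s[1:]
--     return ''.join(' ' if t == '<space>' else '' if t == ' ' else t
--                    for t in tokens(ngram))
-- ===== Notes on version B (the rewrite author's own statement) =====
-- stated objective: simpler
-- what changed: Replaced A's single index-arithmetic while-loop that interleaves scanning and output building with a two-phase pass: a tokenizer that yields angle-bracket tokens or single characters, and a separate classifier ('<space>' -> ' ', ' ' -> '', else keep) joined into the result.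
import Mathlib
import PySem

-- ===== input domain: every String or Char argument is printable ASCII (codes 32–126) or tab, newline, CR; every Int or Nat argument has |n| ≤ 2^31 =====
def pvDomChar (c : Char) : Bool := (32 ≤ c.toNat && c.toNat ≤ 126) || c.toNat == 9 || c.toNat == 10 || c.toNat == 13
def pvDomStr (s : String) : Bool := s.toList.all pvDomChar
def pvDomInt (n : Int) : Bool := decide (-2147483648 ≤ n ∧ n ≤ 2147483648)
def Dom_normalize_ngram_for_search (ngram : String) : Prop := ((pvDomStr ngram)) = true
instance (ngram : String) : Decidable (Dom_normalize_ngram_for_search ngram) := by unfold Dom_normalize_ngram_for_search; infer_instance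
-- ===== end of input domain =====

-- B re-implements A as a two-phase tokenize-then-classify pass (simpler decomposition, same cost); return values proved equal on all inputs.

-- ===== PORT A =====
-- A's while-loop over index i, ported as structural recursion on the remaining suffix
-- (every operation of A — ngram[i:i+7], ngram.find('>', i), ngram[i:end+1] — is relative to i).
def pvALoop : List Char → List Char
  | [] => []
  | c :: rest =>
    if c = '<' then
      if (c :: rest).take 7 = ['<', 's', 'p', 'a', 'c', 'e', '>'] then
        ' ' :: pvALoop ((c :: rest).drop 7)
      else
        -- end = ngram.find('>', i), taken relative to the suffix
        let e := PySem.Chars.find (c :: rest) ['>']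
        if e ≠ -1 then
          (c :: rest).take (e.toNat + 1) ++ pvALoop ((c :: rest).drop (e.toNat + 1))
        else
          c :: pvALoop rest
    else if c = ' ' then
      pvALoop rest
    else
      c :: pvALoop rest
termination_by s => s.length
decreasing_by all_goals simp

def normalize_ngram_for_search (ngram : String) : String :=
  String.ofList (pvALoop ngram.toList)

-- ===== PORT B =====
-- B's tokenizer: an angle-bracket run '<…>' (when a '>' exists) or a single character.
def pvTokens : List Char → List (List Char)
  | [] => []
  | c :: rest =>
    if c = '<' ∧ PySem.Chars.isIn ['>'] (c :: rest) = true then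
      let j := PySem.Chars.find (c :: rest) ['>']   -- s.index('>'), guarded by '>' in s
      (c :: rest).take (j.toNat + 1) :: pvTokens ((c :: rest).drop (j.toNat + 1))
    else
      [c] :: pvTokens rest
termination_by s => s.length
decreasing_by all_goals simp

-- B's classifier: '<space>' ↦ ' ', a plain space ↦ nothing, anything else kept.
def pvClassify (t : List Char) : List Char :=
  if t = ['<', 's', 'p', 'a', 'c', 'e', '>'] then [' ']
  else if t = [' '] then []
  else t

def normalize_ngram_for_search_alt (ngram : String) : String :=
  String.ofList (PySem.Chars.join [] ((pvTokens ngram.toList).map pvClassify))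

-- ===== PRECONDITION & SPEC =====
def Spec_normalize_ngram_for_search (ngram : String) (out : String) : Prop := out = normalize_ngram_for_search_alt ngram
instance (ngram : String) (out : String) : Decidable (Spec_normalize_ngram_for_search ngram out) := by unfold Spec_normalize_ngram_for_search; infer_instance

-- ===== CLAIM (what is proved, stated in full; the proofs are below) =====
def Claim_equal_normalize_ngram_for_search : Prop := ∀ (ngram : String), Dom_normalize_ngram_for_search ngram → Spec_normalize_ngram_for_search ngram (normalize_ngram_for_search ngram)

-- ===== LEMMAS AND PROOFS =====

-- ''.join ps is concatenation.
lemma pvJoinNil (ps : List (List Char)) : PySem.Chars.join [] ps = ps.flatten := by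
  induction ps with
  | nil => simp [PySem.Chars.join_nil]
  | cons p ps ih =>
    cases ps with
    | nil => simp [PySem.Chars.join_singleton]
    | cons q rest => rw [PySem.Chars.join_cons_cons]; simp [ih]

-- On a suffix that starts with the literal token '<space>', the first '>' is at index 6.
lemma pvFindSpace (t : List Char) :
    PySem.Chars.find ('<' :: 's' :: 'p' :: 'a' :: 'c' :: 'e' :: '>' :: t) ['>'] = 6 := by
  have hinf : ['>'] <:+: '<' :: 's' :: 'p' :: 'a' :: 'c' :: 'e' :: '>' :: t :=
    ⟨['<', 's', 'p', 'a', 'c', 'e'], t, by simp⟩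
  have h0 : 0 ≤ PySem.Chars.find ('<' :: 's' :: 'p' :: 'a' :: 'c' :: 'e' :: '>' :: t) ['>'] :=
    (PySem.Chars.find_nonneg_iff _ _).mpr hinf
  obtain ⟨h1, h2⟩ := PySem.Chars.find_spec h0
  set n := (PySem.Chars.find ('<' :: 's' :: 'p' :: 'a' :: 'c' :: 'e' :: '>' :: t) ['>']).toNat with hn
  have hub : n ≤ 6 := by
    by_contra hgt
    exact h2 6 (by omega) ⟨t, rfl⟩
  have hlb : ¬ n < 6 := by
    intro hlt
    interval_cases n <;> simp [List.IsPrefix] at h1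
  omega

-- A token cut at the first '>' cannot be '<space>' unless the suffix started with '<space>'.
lemma pvTakeNeSpace {s : List Char} (e : Int)
    (h7 : ¬ s.take 7 = ['<', 's', 'p', 'a', 'c', 'e', '>']) :
    ¬ s.take (e.toNat + 1) = ['<', 's', 'p', 'a', 'c', 'e', '>'] := by
  intro h
  have hlen : (s.take (e.toNat + 1)).length = 7 := by rw [h]; rfl
  have hmin : min (e.toNat + 1) s.length = 7 := by simpa using hlen
  have h7le : 7 ≤ e.toNat + 1 := by omega
  have htt := List.take_take (i := 7) (j := e.toNat + 1) (l := s)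
  rw [h, Nat.min_eq_left h7le] at htt
  exact h7 (by simpa using htt.symm)

-- Main equivalence: A's scan equals B's tokenize-then-classify on every character list.
lemma pvMain (s : List Char) : pvALoop s = ((pvTokens s).map pvClassify).flatten := by
  induction s using pvALoop.induct with
  | case1 => simp [pvALoop, pvTokens]
  | case2 rest h ih =>
    -- '<space>' at the front: A emits ' ' and skips 7; B's token is '<space>'
    obtain ⟨t, rfl⟩ : ∃ t, rest = 's' :: 'p' :: 'a' :: 'c' :: 'e' :: '>' :: t := by
      refine ⟨rest.drop 6, ?_⟩
      have h6 : rest.take 6 = ['s', 'p', 'a', 'c', 'e', '>'] := by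
        simpa [List.take_succ_cons] using h
      conv_lhs => rw [← List.take_append_drop 6 rest]
      rw [h6]; rfl
    have hfind := pvFindSpace t
    have hin : PySem.Chars.isIn ['>'] ('<' :: 's' :: 'p' :: 'a' :: 'c' :: 'e' :: '>' :: t) = true := by
      rw [PySem.Chars.isIn_iff_infix, ← PySem.Chars.find_nonneg_iff, hfind]; norm_num
    rw [pvALoop, pvTokens]
    simp only [List.drop_succ_cons, List.drop_zero] at ih
    simp [hin, hfind, pvClassify, ih]
  | case3 rest h7 e he ih =>
    -- other '<…>' token: both keep it verbatim
    have he' : PySem.Chars.find ('<' :: rest) ['>'] ≠ -1 := he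
    have h0 : 0 ≤ PySem.Chars.find ('<' :: rest) ['>'] := by
      have := PySem.Chars.neg_one_le_find ('<' :: rest) ['>']
      omega
    have hin : PySem.Chars.isIn ['>'] ('<' :: rest) = true := by
      rw [PySem.Chars.isIn_iff_infix, ← PySem.Chars.find_nonneg_iff]; exact h0
    have hne1 := pvTakeNeSpace (s := '<' :: rest) (PySem.Chars.find ('<' :: rest) ['>']) h7
    rw [List.take_succ_cons] at hne1
    have hne2 : ¬ '<' :: rest.take (PySem.Chars.find ('<' :: rest) ['>']).toNat = [' '] := by simp
    rw [pvALoop, pvTokens]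
    simp only [List.drop_succ_cons] at ih
    simp only [List.take_succ_cons] at h7
    simp [hin, he', h7, pvClassify, hne1, hne2]
    exact ih
  | case4 rest h7 e he ih =>
    -- lone '<' with no '>' anywhere: kept as a single character by both
    have hfind : PySem.Chars.find ('<' :: rest) ['>'] = -1 := by
      by_contra hne
      exact he hne
    have hin : PySem.Chars.isIn ['>'] ('<' :: rest) = false := by
      rw [← Bool.not_eq_true, PySem.Chars.isIn_iff_infix]
      exact (PySem.Chars.find_eq_neg_one_iff _ _).mp hfind
    rw [pvALoop, pvTokens]
    simp only [List.take_succ_cons] at h7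
    simp [hfind, hin, h7, pvClassify, ih]
  | case5 rest h ih =>
    -- a plain space: A skips it, B's classifier drops the token
    rw [pvALoop, pvTokens]
    simp [pvClassify, ih]
  | case6 c rest h1 h2 ih =>
    -- any other character: kept by both
    rw [pvALoop, pvTokens]
    simp [h1, h2, pvClassify, ih]

-- ===== VERDICT (by name: the statement is the Claim_ definition above) =====
theorem normalize_ngram_for_search_spec : Claim_equal_normalize_ngram_for_search := by
  intro ngram _
  unfold Spec_normalize_ngram_for_search normalize_ngram_for_search normalize_ngram_for_search_alt
  rw [pvJoinNil, pvMain]
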